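-- pv_equiv track=rewrite | github.com/JohnSAdair/openelections-data-tx | python-parsers/clarity_parser.py | clean_candidate_name
-- ===== SOURCE A (Python) =====
-- def clean_candidate_name(candidate_text):
--     """
--     Remove party prefixes from candidate names.
--
--     Args:
--         candidate_text (str): Candidate name that may have party prefix
--
--     Returns:
--         str: Clean candidate name without party prefix
--     """
--     if not candidate_text:
--         return candidate_text
--
--     candidate = candidate_text.strip()
--
--     # Common party prefixes to remove
--     party_prefixes = ['REP ', 'DEM ', 'LIB ', 'GRN ', 'IND ']
--
--     for prefix in party_prefixes:
--         if candidate.startswith(prefix):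
--             candidate = candidate[len(prefix):].strip()
--             break
--
--     return candidate
-- ===== SOURCE B (Python) =====
-- _PARTY_ABBREVS = {'REP', 'DEM', 'LIB', 'GRN', 'IND'}
--
-- def clean_candidate_name(candidate_text):
--     if not candidate_text:
--         return candidate_text
--     candidate = candidate_text.strip()
--     parts = candidate.split(' ', 1)
--     if len(parts) == 2 and parts[0] in _PARTY_ABBREVS:
--         return parts[1].strip()
--     return candidate
-- ===== Notes on version B (the rewrite author's own statement) =====
-- stated objective: idiomatic
-- what changed: Replaces A's per-prefix startswith/slice loop by tokenization: split the stripped name at its first space once and test the first token against a set of bare party abbreviations, returning the stripped second token on a hit.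
import Mathlib
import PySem

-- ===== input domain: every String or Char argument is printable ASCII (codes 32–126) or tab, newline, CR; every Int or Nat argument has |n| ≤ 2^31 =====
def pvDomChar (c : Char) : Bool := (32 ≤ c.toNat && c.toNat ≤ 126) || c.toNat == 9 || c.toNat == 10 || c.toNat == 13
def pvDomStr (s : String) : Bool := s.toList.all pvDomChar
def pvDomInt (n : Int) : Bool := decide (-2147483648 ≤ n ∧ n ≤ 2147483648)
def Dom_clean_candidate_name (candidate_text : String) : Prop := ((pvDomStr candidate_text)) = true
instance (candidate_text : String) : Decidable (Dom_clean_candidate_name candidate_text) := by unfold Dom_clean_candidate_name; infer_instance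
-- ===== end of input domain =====

-- B replaces A's per-prefix startswith/slice loop by tokenization: one split at the first
-- space and a set-membership test of the first token against bare party abbreviations
-- (objective: idiomatic).

-- ===== PORT A =====
-- the for-loop over party_prefixes with its break: first matching prefix strips, otherwise fall through
def pvPartyLoop (candidate : String) : List String → String
  | [] => candidate
  | p :: rest =>
      if PySem.Str.startswith candidate p = true then
        PySem.Str.strip (PySem.Str.slice candidate (some (PySem.Str.len p)) none)
      else pvPartyLoop candidate rest

def clean_candidate_name (candidate_text : String) : String :=
  if candidate_text = "" then candidate_text
  else
    pvPartyLoop (PySem.Str.strip candidate_text) ["REP ", "DEM ", "LIB ", "GRN ", "IND "]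

-- ===== PORT B =====
def pvPartyAbbrevs : PySem.Set String := PySem.Set.ofList ["REP", "DEM", "LIB", "GRN", "IND"]

def clean_candidate_name_alt (candidate_text : String) : String :=
  if candidate_text = "" then candidate_text
  else
    let candidate := PySem.Str.strip candidate_text
    -- parts = candidate.split(' ', 1); if len(parts) == 2 and parts[0] in set: return parts[1].strip()
    match PySem.Str.splitMax? candidate " " 1 with
    | some [p, r] => if pvPartyAbbrevs.contains p = true then PySem.Str.strip r else candidate
    | _ => candidate

-- ===== PRECONDITION & SPEC =====
def Spec_clean_candidate_name (candidate_text : String) (out : String) : Prop := out = clean_candidate_name_alt candidate_text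
instance (candidate_text : String) (out : String) : Decidable (Spec_clean_candidate_name candidate_text out) := by unfold Spec_clean_candidate_name; infer_instance

-- ===== CLAIM (what is proved, stated in full; the proofs are below) =====
def Claim_equal_clean_candidate_name : Prop := ∀ (candidate_text : String), Dom_clean_candidate_name candidate_text → Spec_clean_candidate_name candidate_text (clean_candidate_name candidate_text)

-- ===== LEMMAS AND PROOFS =====

-- splitOnMax.go with maxsplit exhausted collects the rest as one piece
theorem pv_go_zero : ∀ (fuel : Nat) (l cur : List Char) (acc : List (List Char)),
    PySem.Chars.splitOnMax.go [' '] fuel 0 l cur acc = ((cur.reverse ++ l) :: acc).reverse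
  | 0, l, cur, acc => by simp [PySem.Chars.splitOnMax.go]
  | _+1, [], cur, acc => by simp [PySem.Chars.splitOnMax.go]
  | _+1, _::_, cur, acc => by simp [PySem.Chars.splitOnMax.go]

-- characterization of splitOnMax.go for sep = [' '], maxsplit = 1
theorem pv_go_char : ∀ (fuel : Nat) (l cur : List Char) (acc : List (List Char)), l.length < fuel →
    PySem.Chars.splitOnMax.go [' '] fuel 1 l cur acc =
      if ' ' ∈ l then
        acc.reverse ++ [cur.reverse ++ l.takeWhile (· ≠ ' '), (l.dropWhile (· ≠ ' ')).tail]
      else acc.reverse ++ [cur.reverse ++ l]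
  | 0, l, _, _, h => by simp at h
  | _+1, [], cur, acc, _ => by simp [PySem.Chars.splitOnMax.go]
  | f+1, c::rest, cur, acc, h => by
      by_cases hc : c = ' '
      · subst hc
        simp [PySem.Chars.splitOnMax.go, pv_go_zero, List.isPrefixOf]
      · have ih := pv_go_char f rest (c::cur) acc (by simpa using Nat.lt_of_succ_lt_succ h)
        simp only [PySem.Chars.splitOnMax.go, List.isPrefixOf]
        rw [if_neg (by decide), if_neg (by simp [Ne.symm hc])]
        rw [ih]
        by_cases hs : ' ' ∈ rest
        · rw [if_pos hs, if_pos (by simp [hs])]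
          simp [hc]
        · rw [if_neg hs, if_neg (by simp [Ne.symm hc, hs])]
          simp

-- s.split(' ', 1) in closed form
theorem pv_split_char (c : String) :
    PySem.Str.splitMax? c " " 1 =
      some (if ' ' ∈ c.toList then
        [String.ofList (c.toList.takeWhile (· ≠ ' ')),
         String.ofList ((c.toList.dropWhile (· ≠ ' ')).tail)]
      else [String.ofList c.toList]) := by
  rw [PySem.Str.splitMax?]
  show Option.map _ (PySem.Chars.splitMax? c.toList [' '] 1) = _
  rw [PySem.Chars.splitMax?]
  rw [if_neg (by decide)]
  rw [PySem.Chars.splitOnMax, if_neg (by decide)]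
  rw [show Int.toNat 1 = 1 from rfl]
  rw [pv_go_char (c.toList.length + 1) c.toList [] [] (by omega)]
  by_cases h : ' ' ∈ c.toList <;> simp [h]

-- if ' ' occurs in l, l decomposes as (takeWhile before the space) ++ ' ' :: (tail after it)
theorem pv_struct : ∀ (l : List Char), ' ' ∈ l →
    l = l.takeWhile (· ≠ ' ') ++ ' ' :: (l.dropWhile (· ≠ ' ')).tail
  | [], h => by simp at h
  | c :: rest, h => by
      by_cases hc : c = ' '
      · subst hc; simp
      · have hr : ' ' ∈ rest := by
          rcases List.mem_cons.mp h with h1 | h1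
          · exact absurd h1.symm hc
          · exact h1
        have ih := pv_struct rest hr
        simp only [List.takeWhile_cons, List.dropWhile_cons]
        rw [if_pos (by simp [hc]), if_pos (by simp [hc])]
        simpa using ih

-- takeWhile/dropWhile on a space-free block followed by a space
theorem pv_tw_app : ∀ (t3 t : List Char), ' ' ∉ t3 →
    (t3 ++ ' ' :: t).takeWhile (· ≠ ' ') = t3 ∧ (t3 ++ ' ' :: t).dropWhile (· ≠ ' ') = ' ' :: t
  | [], t, _ => by simp
  | c :: cs, t, h => by
      have hc : c ≠ ' ' := fun hh => h (by simp [hh])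
      have ih := pv_tw_app cs t (fun hh => h (by simp [hh]))
      simp only [List.cons_append, List.takeWhile_cons, List.dropWhile_cons]
      rw [if_pos (by simp [hc]), if_pos (by simp [hc])]
      exact ⟨by rw [ih.1], ih.2⟩

theorem pv_main (c : String) :
    pvPartyLoop c ["REP ", "DEM ", "LIB ", "GRN ", "IND "] =
      (match PySem.Str.splitMax? c " " 1 with
       | some [p, r] => if pvPartyAbbrevs.contains p = true then PySem.Str.strip r else c
       | _ => c) := by
  rw [pv_split_char]
  by_cases hsp : ' ' ∈ c.toList
  case neg =>
    -- no space: the split has one piece; no " "-terminated prefix can match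
    rw [if_neg hsp]
    have nosw : ∀ p : String, ' ' ∈ p.toList → ¬ PySem.Str.startswith c p = true := by
      intro p hp hsw
      rw [PySem.Str.startswith_eq, PySem.Chars.startswith_iff] at hsw
      exact hsp (hsw.subset hp)
    simp only [pvPartyLoop]
    rw [if_neg (nosw _ (by decide)), if_neg (nosw _ (by decide)), if_neg (nosw _ (by decide)),
        if_neg (nosw _ (by decide)), if_neg (nosw _ (by decide))]
  case pos =>
    rw [if_pos hsp]
    set tw := c.toList.takeWhile (· ≠ ' ') with htw
    set tl := (c.toList.dropWhile (· ≠ ' ')).tail with htl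
    have hdec : c.toList = tw ++ ' ' :: tl := pv_struct c.toList hsp
    -- a " "-terminated prefix matches exactly when the first token is its bare abbreviation
    have key : ∀ (pf : String) (t3 : List Char), pf.toList = t3 ++ [' '] → ' ' ∉ t3 →
        (PySem.Str.startswith c pf = true ↔ tw = t3) := by
      intro pf t3 hpf h3
      rw [PySem.Str.startswith_eq, PySem.Chars.startswith_iff]
      constructor
      · rintro ⟨t, ht⟩
        rw [hpf] at ht
        have hc : c.toList = t3 ++ ' ' :: t := by rw [← ht]; simp
        rw [htw, hc]
        exact (pv_tw_app t3 t h3).1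
      · intro h
        exact ⟨tl, by rw [hpf, hdec, h]; simp⟩
    -- on a hit, A's slice-then-strip equals B's strip of the second token
    have hval : ∀ (pf : String) (t3 : List Char), pf.toList = t3 ++ [' '] → tw = t3 →
        t3.length = 3 →
        PySem.Str.strip (PySem.Str.slice c (some (PySem.Str.len pf)) none) =
          PySem.Str.strip (String.ofList tl) := by
      intro pf t3 hpf h hlen
      have hlpf : PySem.Str.len pf = (4 : Int) := by
        rw [PySem.Str.len, hpf]; simp [hlen]
      rw [← String.toList_inj]
      simp only [PySem.Str.toList_strip, PySem.Str.toList_slice, PySem.Chars.slice_eq_listSlice, hlpf]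
      rw [PySem.List.slice_from c.toList (by norm_num)]
      have : c.toList.drop (Int.toNat 4) = tl := by
        conv_lhs => rw [hdec, h]
        rw [show Int.toNat 4 = t3.length + 1 from by omega]
        simp [List.drop_append]
      rw [this]
      simp
    have hcont : ∀ p : String, pvPartyAbbrevs.contains p = true ↔
        (p = "REP" ∨ p = "DEM" ∨ p = "LIB" ∨ p = "GRN" ∨ p = "IND") := by
      intro p
      simp [pvPartyAbbrevs, PySem.Set.contains, PySem.Set.ofList]
    have hofl : ∀ (t3 : List Char) (s : String), String.ofList tw = s → s.toList = t3 → tw = t3 := by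
      intro t3 s h hs
      rw [← String.toList_inj] at h
      simpa [hs] using h
    simp only [pvPartyLoop]
    by_cases h1 : tw = ['R','E','P']
    · rw [if_pos ((key "REP " _ rfl (by decide)).2 h1),
          if_pos ((hcont _).2 (Or.inl (by rw [h1])))]
      exact hval "REP " _ rfl h1 (by decide)
    rw [if_neg (fun hh => h1 ((key "REP " _ rfl (by decide)).1 hh))]
    by_cases h2 : tw = ['D','E','M']
    · rw [if_pos ((key "DEM " _ rfl (by decide)).2 h2),
          if_pos ((hcont _).2 (Or.inr (Or.inl (by rw [h2]))))]
      exact hval "DEM " _ rfl h2 (by decide)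
    rw [if_neg (fun hh => h2 ((key "DEM " _ rfl (by decide)).1 hh))]
    by_cases h3 : tw = ['L','I','B']
    · rw [if_pos ((key "LIB " _ rfl (by decide)).2 h3),
          if_pos ((hcont _).2 (Or.inr (Or.inr (Or.inl (by rw [h3])))))]
      exact hval "LIB " _ rfl h3 (by decide)
    rw [if_neg (fun hh => h3 ((key "LIB " _ rfl (by decide)).1 hh))]
    by_cases h4 : tw = ['G','R','N']
    · rw [if_pos ((key "GRN " _ rfl (by decide)).2 h4),
          if_pos ((hcont _).2 (Or.inr (Or.inr (Or.inr (Or.inl (by rw [h4]))))))]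
      exact hval "GRN " _ rfl h4 (by decide)
    rw [if_neg (fun hh => h4 ((key "GRN " _ rfl (by decide)).1 hh))]
    by_cases h5 : tw = ['I','N','D']
    · rw [if_pos ((key "IND " _ rfl (by decide)).2 h5),
          if_pos ((hcont _).2 (Or.inr (Or.inr (Or.inr (Or.inr (by rw [h5]))))))]
      exact hval "IND " _ rfl h5 (by decide)
    rw [if_neg (fun hh => h5 ((key "IND " _ rfl (by decide)).1 hh))]
    rw [if_neg]
    rw [hcont]
    push Not
    exact ⟨fun hh => h1 (hofl _ _ hh rfl), fun hh => h2 (hofl _ _ hh rfl),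
           fun hh => h3 (hofl _ _ hh rfl), fun hh => h4 (hofl _ _ hh rfl),
           fun hh => h5 (hofl _ _ hh rfl)⟩

-- ===== VERDICT (by name: the statement is the Claim_ definition above) =====
theorem clean_candidate_name_spec : Claim_equal_clean_candidate_name := by
  intro t _
  unfold Spec_clean_candidate_name clean_candidate_name clean_candidate_name_alt
  by_cases h : t = "" <;> simp [h, pv_main]
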